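-- pv_equiv track=rewrite | github.com/SphinX8102001/CSE221_Labs | Lab1/E.py | can_sort_with_reversals
-- ===== SOURCE A (Python) =====
-- def can_sort_with_reversals(n, arr):
--     if n <= 2:
--         return True
--     working_arr = arr.copy()
--     sorted_arr = sorted(arr)
--
--     made_change = True
--     while made_change:
--         made_change = False
--         for i in range(n - 2):
--
--             sub_arr = working_arr[i:i+3]
--             reversed_sub = sub_arr[::-1]
--             correct_before = sum(1 for j in range(n) if working_arr[j] == sorted_arr[j])
--
--             temp_arr = working_arr.copy()
--             temp_arr[i:i+3] = reversed_sub
--             correct_after = sum(1 for j in range(n) if temp_arr[j] == sorted_arr[j])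
--             if correct_after > correct_before:
--                 working_arr[i:i+3] = reversed_sub
--                 made_change = True
--                 if working_arr == sorted_arr:
--                     return True
--
--     return working_arr == sorted_arr
-- ===== SOURCE B (Python) =====
-- def can_sort_with_reversals(n, arr):
--     if n <= 2:
--         return True
--     working = arr.copy()
--     target = sorted(arr)
--     # A length-3 reversal only swaps positions i and i+2, so the even-indexed
--     # and odd-indexed positions evolve independently: bring each parity class
--     # to its greedy fixpoint separately (even class first, then odd class).
--     for start in (0, 1):
--         changed = True
--         while changed:
--             changed = False
--             for i in range(start, n - 2, 2):
--                 a, c = working[i], working[i + 2]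
--                 sa, sc = target[i], target[i + 2]
--                 delta = (c == sa) + (a == sc) - (a == sa) - (c == sc)
--                 if delta > 0:
--                     working[i], working[i + 2] = c, a
--                     changed = True
--     return working == target
-- ===== Notes on version B (the rewrite author's own statement) =====
-- stated objective: faster
-- what changed: B decomposes the problem into two independent subproblems: a length-3 reversal only swaps positions i and i+2, so even- and odd-indexed positions never interact; B brings each parity class to its greedy fixpoint separately (stride-2 scans, even class first, then odd class) with an O(1) match-delta test per window, instead of A's interleaved full-array passes that rebuild two array copies and recount all n matches for every window.
import Mathlib
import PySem

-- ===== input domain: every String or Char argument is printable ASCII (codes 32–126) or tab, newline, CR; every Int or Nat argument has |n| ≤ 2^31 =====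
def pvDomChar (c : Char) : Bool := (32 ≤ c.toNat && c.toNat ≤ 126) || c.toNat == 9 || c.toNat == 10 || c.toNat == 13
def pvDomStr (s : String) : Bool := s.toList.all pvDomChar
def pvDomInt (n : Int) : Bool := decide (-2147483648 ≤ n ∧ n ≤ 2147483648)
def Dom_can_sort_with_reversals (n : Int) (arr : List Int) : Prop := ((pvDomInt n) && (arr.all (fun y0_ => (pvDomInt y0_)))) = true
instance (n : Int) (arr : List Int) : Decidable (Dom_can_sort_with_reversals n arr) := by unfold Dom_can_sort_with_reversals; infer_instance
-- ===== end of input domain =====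

-- B decomposes the task into two independent parity subproblems (a length-3 reversal
-- only swaps positions i and i+2, so even- and odd-indexed positions never interact):
-- each parity class is brought to its greedy fixpoint separately with an O(1)
-- per-window test, instead of A's interleaved passes that copy the array and recount
-- all matches for every window.

-- ===== PORT A =====
-- sum(1 for j in range(n) if w[j] == s[j])
def pvA_count (w s : List Int) (n : Int) : Int :=
  ((PySem.List.pyRange 0 n 1).filter
    (fun j => PySem.List.pyGetD w j 0 == PySem.List.pyGetD s j 0)).length

-- slice assignment w[i:i+3] = rev, i.e. w[:i] + rev + w[i+3:]
def pvA_assign (w : List Int) (i : Int) (rev : List Int) : List Int :=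
  PySem.List.slice w none (some i) ++ rev ++ PySem.List.slice w (some (i + 3)) none

-- the body of 'for i in range(n-2)'; Sum.inl b = the early 'return True'
def pvA_inner (s : List Int) (n : Int) : List Int → List Int → Bool → Sum Bool (List Int × Bool)
  | [], w, mc => Sum.inr (w, mc)
  | i :: rest, w, mc =>
    let sub := PySem.List.slice w (some i) (some (i + 3))
    let rev := sub.reverse      -- sub[::-1]
    let correct_before := pvA_count w s n
    let temp := pvA_assign w i rev
    let correct_after := pvA_count temp s n
    if correct_after > correct_before then
      let w' := pvA_assign w i rev
      if w' == s then Sum.inl true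
      else pvA_inner s n rest w' true
    else pvA_inner s n rest w mc

-- 'while made_change'; fuel n.toNat+1 is never exhausted on real runs: every changing
-- pass strictly increases the match count, which is bounded by n
def pvA_loop (s : List Int) (n : Int) : Nat → List Int → Bool
  | 0, w => w == s
  | fuel + 1, w =>
    match pvA_inner s n (PySem.List.pyRange 0 (n - 2) 1) w false with
    | Sum.inl b => b
    | Sum.inr (w', mc) => if mc then pvA_loop s n fuel w' else w' == s

def can_sort_with_reversals (n : Int) (arr : List Int) : Bool :=
  if n ≤ 2 then true
  else pvA_loop (PySem.List.sorted arr (fun x => x) false) n (n.toNat + 1) arr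

-- ===== PORT B =====
-- one scan 'for i in range(start, n-2, 2)' of Source B's inner loop, over a given index list
def pvB_pass (s : List Int) : List Int → List Int → Bool → List Int × Bool
  | [], w, ch => (w, ch)
  | i :: rest, w, ch =>
    let a := PySem.List.pyGetD w i 0
    let c := PySem.List.pyGetD w (i + 2) 0
    let sa := PySem.List.pyGetD s i 0
    let sc := PySem.List.pyGetD s (i + 2) 0
    let delta : Int := (if c == sa then 1 else 0) + (if a == sc then 1 else 0)
      - (if a == sa then 1 else 0) - (if c == sc then 1 else 0)
    if delta > 0 then
      pvB_pass s rest (PySem.List.pySetD (PySem.List.pySetD w i c) (i + 2) a) true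
    else pvB_pass s rest w ch

-- 'while changed' for one parity class; fuel n.toNat+1 is never exhausted: every
-- changing scan strictly increases the match count, which is bounded by n
def pvB_run (s : List Int) (idxs : List Int) : Nat → List Int → List Int
  | 0, w => w
  | fuel + 1, w =>
    match pvB_pass s idxs w false with
    | (w', ch) => if ch then pvB_run s idxs fuel w' else w'

def can_sort_with_reversals_alt (n : Int) (arr : List Int) : Bool :=
  if n ≤ 2 then true
  else
    let s := PySem.List.sorted arr (fun x => x) false
    let w1 := pvB_run s (PySem.List.pyRange 0 (n - 2) 2) (n.toNat + 1) arr
    let w2 := pvB_run s (PySem.List.pyRange 1 (n - 2) 2) (n.toNat + 1) w1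
    w2 == s

-- ===== PRECONDITION & SPEC =====
-- Pre_ excludes only the inputs on which A raises IndexError: n > 2 together with
-- n > len(arr) makes working_arr[j] for j in range(n) go out of range.
def Pre_can_sort_with_reversals (n : Int) (arr : List Int) : Prop :=
  n ≤ 2 ∨ n ≤ (arr.length : Int)
instance (n : Int) (arr : List Int) : Decidable (Pre_can_sort_with_reversals n arr) := by
  unfold Pre_can_sort_with_reversals; infer_instance

def pvWitness_can_sort_with_reversals : Int × List Int := (3, [3, 1, 2])

def Spec_can_sort_with_reversals (n : Int) (arr : List Int) (out : Bool) : Prop :=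
  out = can_sort_with_reversals_alt n arr
instance (n : Int) (arr : List Int) (out : Bool) : Decidable (Spec_can_sort_with_reversals n arr out) := by
  unfold Spec_can_sort_with_reversals; infer_instance

-- ===== CLAIM (what is proved, stated in full; the proofs are below) =====
def Claim_equal_can_sort_with_reversals : Prop :=
  ∀ (n : Int) (arr : List Int), Dom_can_sort_with_reversals n arr →
    Pre_can_sort_with_reversals n arr →
    Spec_can_sort_with_reversals n arr (can_sort_with_reversals n arr)

-- ===== LEMMAS AND PROOFS =====

theorem pv_witness_ok :
    Dom_can_sort_with_reversals pvWitness_can_sort_with_reversals.1 pvWitness_can_sort_with_reversals.2 ∧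
    Pre_can_sort_with_reversals pvWitness_can_sort_with_reversals.1 pvWitness_can_sort_with_reversals.2 := by
  constructor <;> decide

-- ---------------------------------------------------------------
-- Part 1: A's pass equals B's pass run over the same index list
-- (A's full recount and slice assignment = B's O(1)-delta window swap)
-- ---------------------------------------------------------------

-- countP over an initial range as a Finset sum
theorem pv_countP_range_eq_sum (p : Nat → Bool) (m : Nat) :
    (List.range m).countP p = ∑ j ∈ Finset.range m, (if p j then 1 else 0) := by
  induction m with
  | zero => simp
  | succ m ih =>
    rw [List.range_succ, List.countP_append, Finset.sum_range_succ, ih]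
    simp [List.countP_cons]

-- two predicates agreeing everywhere except at two points k1 ≠ k2 < m
theorem pv_count2 (p q : Nat → Bool) (m k1 k2 : Nat) (h1 : k1 < m) (h2 : k2 < m)
    (hne : k1 ≠ k2) (hpq : ∀ j, j ≠ k1 → j ≠ k2 → p j = q j) :
    (List.range m).countP p + ((if q k1 then 1 else 0) + (if q k2 then 1 else 0))
      = (List.range m).countP q + ((if p k1 then 1 else 0) + (if p k2 then 1 else 0)) := by
  rw [pv_countP_range_eq_sum, pv_countP_range_eq_sum]
  have hm1 : k1 ∈ Finset.range m := Finset.mem_range.2 h1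
  have hm2 : k2 ∈ (Finset.range m).erase k1 := Finset.mem_erase.2 ⟨fun h => hne h.symm, Finset.mem_range.2 h2⟩
  rw [← Finset.add_sum_erase _ (fun j => if p j then 1 else 0) hm1,
      ← Finset.add_sum_erase _ (fun j => if p j then 1 else 0) hm2,
      ← Finset.add_sum_erase _ (fun j => if q j then 1 else 0) hm1,
      ← Finset.add_sum_erase _ (fun j => if q j then 1 else 0) hm2]
  have hrest : ∑ x ∈ ((Finset.range m).erase k1).erase k2, (if p x then 1 else 0)
      = ∑ x ∈ ((Finset.range m).erase k1).erase k2, (if q x then 1 else 0) := by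
    refine Finset.sum_congr rfl (fun x hx => ?_)
    have hx2 := Finset.mem_erase.1 hx
    have hx1 := Finset.mem_erase.1 hx2.2
    rw [hpq x hx1.1 hx2.1]
  omega

theorem pv_pvA_count_eq (w s : List Int) (n : Int) :
    pvA_count w s n = (((List.range n.toNat).countP
      (fun (j : Nat) => PySem.List.pyGetD w (j : Int) 0 == PySem.List.pyGetD s (j : Int) 0)) : Int) := by
  unfold pvA_count
  rw [PySem.List.pyRange_one, List.filter_map, List.length_map, List.countP_eq_length_filter]
  have h0 : n - 0 = n := by ring
  rw [h0]
  refine congrArg Int.ofNat (congrArg List.length (List.filter_congr ?_))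
  intro j _
  simp [Function.comp]

theorem pv_drop_window (w : List Int) (k : Nat) (h : k + 3 ≤ w.length) :
    w.drop k = w.getD k 0 :: w.getD (k+1) 0 :: w.getD (k+2) 0 :: w.drop (k+3) := by
  rw [List.drop_eq_getElem_cons (by omega), List.drop_eq_getElem_cons (by omega),
      List.drop_eq_getElem_cons (by omega),
      List.getD_eq_getElem _ _ (show k < w.length by omega),
      List.getD_eq_getElem _ _ (show k+1 < w.length by omega),
      List.getD_eq_getElem _ _ (show k+2 < w.length by omega)]

theorem pv_set2_append (t r : List Int) (a b c : Int) :
    ((t ++ a :: b :: c :: r).set t.length c).set (t.length + 2) a = t ++ c :: b :: a :: r := by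
  induction t with
  | nil => simp
  | cons x t ih =>
    simp only [List.cons_append, List.length_cons]
    rw [show t.length + 1 + 2 = (t.length + 2) + 1 by omega]
    simp only [List.set_cons_succ]
    rw [ih]

-- A's slice assignment w[i:i+3] = w[i:i+3][::-1] is the two-point swap B performs
theorem pv_assign_eq (w : List Int) (k : Nat) (h : k + 3 ≤ w.length) :
    pvA_assign w (k : Int) ((PySem.List.slice w (some (k : Int)) (some ((k : Int) + 3))).reverse)
      = PySem.List.pySetD (PySem.List.pySetD w (k : Int) (w.getD (k+2) 0)) (((k + 2 : Nat)) : Int) (w.getD k 0) := by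
  have hc3 : ((k : Int) + 3) = (((k + 3 : Nat)) : Int) := by push_cast; ring
  unfold pvA_assign
  rw [hc3, PySem.List.slice_natCast, PySem.List.slice_to_natCast, PySem.List.slice_from_natCast,
      PySem.List.pySetD_natCast, PySem.List.pySetD_natCast]
  have hw : w.take k ++ w.getD k 0 :: w.getD (k+1) 0 :: w.getD (k+2) 0 :: w.drop (k+3) = w := by
    rw [← pv_drop_window w k h]; exact List.take_append_drop k w
  have hlen : (w.take k).length = k := by simp; omega
  have key := pv_set2_append (w.take k) (w.drop (k+3)) (w.getD k 0) (w.getD (k+1) 0) (w.getD (k+2) 0)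
  rw [hlen, hw] at key
  rw [key, pv_drop_window w k h]
  simp

-- the exact O(1) delta of a window reversal, as an inequality on A's full recount
theorem pv_cond_iff (w s : List Int) (n : Int) (k : Nat)
    (hk2 : k + 2 < n.toNat) (hkL : k + 3 ≤ w.length) :
    (pvA_count (PySem.List.pySetD (PySem.List.pySetD w (k : Int) (w.getD (k+2) 0)) (((k + 2 : Nat)) : Int) (w.getD k 0)) s n
        > pvA_count w s n)
      ↔ ((if w.getD (k+2) 0 == s.getD k 0 then (1:Int) else 0)
          + (if w.getD k 0 == s.getD (k+2) 0 then 1 else 0)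
          - (if w.getD k 0 == s.getD k 0 then 1 else 0)
          - (if w.getD (k+2) 0 == s.getD (k+2) 0 then 1 else 0) > 0) := by
  have hkw : k < w.length := by omega
  have hk2w : k + 2 < (PySem.List.pySetD w (k:Int) (w.getD (k+2) 0)).length := by
    rw [PySem.List.length_pySetD]; omega
  have hpt : ∀ j : Nat,
      PySem.List.pyGetD (PySem.List.pySetD (PySem.List.pySetD w (k : Int) (w.getD (k+2) 0)) (((k + 2 : Nat)) : Int) (w.getD k 0)) (j : Int) 0
        = if j = k + 2 then w.getD k 0 else if j = k then w.getD (k+2) 0 else PySem.List.pyGetD w (j : Int) 0 := by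
    intro j
    rw [PySem.List.pyGetD_pySetD_natCast _ _ _ _ _ hk2w]
    by_cases hj : j = k + 2
    · simp [hj]
    · rw [if_neg hj, if_neg hj, PySem.List.pyGetD_pySetD_natCast _ _ _ _ _ hkw]
  have hpeq : (fun j : Nat =>
        PySem.List.pyGetD (PySem.List.pySetD (PySem.List.pySetD w (k : Int) (w.getD (k+2) 0)) (((k + 2 : Nat)) : Int) (w.getD k 0)) (j : Int) 0
          == PySem.List.pyGetD s (j : Int) 0)
      = (fun j : Nat =>
        (if j = k + 2 then w.getD k 0 else if j = k then w.getD (k+2) 0 else PySem.List.pyGetD w (j : Int) 0)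
          == PySem.List.pyGetD s (j : Int) 0) := by
    funext j; rw [hpt j]
  rw [pv_pvA_count_eq, pv_pvA_count_eq, hpeq]
  have hcount := pv_count2
    (fun j : Nat =>
      (if j = k + 2 then w.getD k 0 else if j = k then w.getD (k+2) 0 else PySem.List.pyGetD w (j : Int) 0)
        == PySem.List.pyGetD s (j : Int) 0)
    (fun j : Nat => PySem.List.pyGetD w (j : Int) 0 == PySem.List.pyGetD s (j : Int) 0)
    n.toNat k (k+2) (by omega) (by omega) (by omega)
    (by intro j hj1 hj2; simp only [if_neg hj2, if_neg hj1])
  simp only [PySem.List.pyGetD_natCast] at hcount ⊢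
  split_ifs at hcount ⊢ <;> omega

theorem pv_pvB_pass_self (s : List Int) : ∀ (l : List Int) (ch : Bool),
    pvB_pass s l s ch = (s, ch) := by
  intro l
  induction l with
  | nil => intro ch; rfl
  | cons i rest ih =>
    intro ch
    simp only [pvB_pass]
    rw [if_neg (by simp only [beq_self_eq_true, if_true]; split_ifs <;> omega)]
    exact ih ch

theorem pv_inner_rel (s : List Int) (n : Int) (hn : n ≤ (s.length : Int)) :
    ∀ (l : List Int), (∀ i ∈ l, 0 ≤ i ∧ i + 3 ≤ n) →
    ∀ (w : List Int) (mc : Bool), w.length = s.length →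
    (pvA_inner s n l w mc = Sum.inl true ∧ pvB_pass s l w mc = (s, true)) ∨
    (∃ w' ch, pvA_inner s n l w mc = Sum.inr (w', ch) ∧ pvB_pass s l w mc = (w', ch)
      ∧ w'.length = s.length) := by
  intro l
  induction l with
  | nil => intro _ w mc hw; exact Or.inr ⟨w, mc, rfl, rfl, hw⟩
  | cons i rest ih =>
    intro hl w mc hw
    obtain ⟨hi0, hi3⟩ := hl i (by simp)
    have hrest : ∀ j ∈ rest, 0 ≤ j ∧ j + 3 ≤ n := fun j hj => hl j (by simp [hj])
    have hik : i = (i.toNat : Int) := (Int.toNat_of_nonneg hi0).symm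
    set k : Nat := i.toNat with hkdef
    have hk3 : k + 3 ≤ w.length := by omega
    have hk2n : k + 2 < n.toNat := by omega
    have hc2 : ((k : Int) + 2) = (((k + 2 : Nat)) : Int) := by push_cast; ring
    simp only [pvA_inner, pvB_pass, hik]
    simp only [pv_assign_eq w k hk3]
    simp only [hc2, PySem.List.pyGetD_natCast]
    simp only [pv_cond_iff w s n k hk2n hk3]
    set W2 := PySem.List.pySetD (PySem.List.pySetD w ((k : Nat) : Int) (w.getD (k+2) 0)) (((k + 2 : Nat)) : Int) (w.getD k 0) with hW2
    have hW2len : W2.length = s.length := by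
      rw [hW2, PySem.List.length_pySetD, PySem.List.length_pySetD, hw]
    by_cases hcond : ((if w.getD (k+2) 0 == s.getD k 0 then (1:Int) else 0)
        + (if w.getD k 0 == s.getD (k+2) 0 then 1 else 0)
        - (if w.getD k 0 == s.getD k 0 then 1 else 0)
        - (if w.getD (k+2) 0 == s.getD (k+2) 0 then 1 else 0) > 0)
    · rw [if_pos hcond, if_pos hcond]
      by_cases heqb : (W2 == s) = true
      · rw [if_pos heqb]
        have heq : W2 = s := by simpa using heqb
        refine Or.inl ⟨rfl, ?_⟩
        rw [heq]
        exact pv_pvB_pass_self s rest true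
      · rw [if_neg heqb]
        exact ih hrest W2 true hW2len
    · rw [if_neg hcond, if_neg hcond]
      exact ih hrest w mc hw

-- the Int-world combined-scan loop (A's pass order), bridged from pvA_loop
def pvC_loop (s : List Int) (n : Int) : Nat → List Int → Bool
  | 0, w => w == s
  | fuel + 1, w =>
    match pvB_pass s (PySem.List.pyRange 0 (n - 2) 1) w false with
    | (w', ch) => if ch then pvC_loop s n fuel w' else w' == s

theorem pv_pvC_loop_self (s : List Int) (n : Int) : ∀ (f : Nat), pvC_loop s n f s = true := by
  intro f
  cases f with
  | zero => simp [pvC_loop]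
  | succ f => simp [pvC_loop, pv_pvB_pass_self]

theorem pv_loop_rel (s : List Int) (n : Int) (hn : n ≤ (s.length : Int)) :
    ∀ (fuel : Nat) (w : List Int), w.length = s.length →
      pvA_loop s n fuel w = pvC_loop s n fuel w := by
  intro fuel
  induction fuel with
  | zero => intro w _; rfl
  | succ fuel ih =>
    intro w hw
    have hl : ∀ i ∈ PySem.List.pyRange 0 (n - 2) 1, 0 ≤ i ∧ i + 3 ≤ n := by
      intro i hi
      rw [PySem.List.mem_pyRange_one] at hi
      omega
    rcases pv_inner_rel s n hn (PySem.List.pyRange 0 (n - 2) 1) hl w false hw with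
      ⟨hA, hB⟩ | ⟨w', ch, hA, hB, hlen⟩
    · simp only [pvA_loop, pvC_loop, hA, hB]
      rw [pv_pvC_loop_self]
      simp
    · simp only [pvA_loop, pvC_loop, hA, hB]
      by_cases hch : ch = true
      · subst hch; simpa using ih w' hlen
      · simp [hch]

-- ---------------------------------------------------------------
-- Part 2: Nat-index model of the greedy; even and odd windows are
-- independent, so the combined scan = even scan then odd scan, and
-- the interleaved fixpoint = staged parity fixpoints
-- ---------------------------------------------------------------

-- does the window at k improve the match count? (the O(1) delta test)
def pvCond (s w : List Int) (k : Nat) : Bool :=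
  ((if w.getD (k+2) 0 == s.getD k 0 then (1:Int) else 0)
    + (if w.getD k 0 == s.getD (k+2) 0 then 1 else 0)
    - (if w.getD k 0 == s.getD k 0 then 1 else 0)
    - (if w.getD (k+2) 0 == s.getD (k+2) 0 then 1 else 0)) > 0

def pvApply (s w : List Int) (k : Nat) : List Int :=
  if pvCond s w k then (w.set k (w.getD (k+2) 0)).set (k+2) (w.getD k 0) else w

def pvPB (s : List Int) : List Nat → List Int → List Int × Bool
  | [], w => (w, false)
  | k :: ks, w =>
    let r := pvPB s ks (pvApply s w k)
    (r.1, pvCond s w k || r.2)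

def pvLoopN (s : List Int) (ks : List Nat) : Nat → List Int → List Int
  | 0, w => w
  | f + 1, w =>
    let r := pvPB s ks w
    if r.2 then pvLoopN s ks f r.1 else r.1

def pvCnt (s : List Int) (N : Nat) (w : List Int) : Nat :=
  (List.range N).countP (fun j => w.getD j 0 == s.getD j 0)

def pvKsE (N : Nat) : List Nat := (List.range (N - 2)).filter (fun k => k % 2 == 0)
def pvKsO (N : Nat) : List Nat := (List.range (N - 2)).filter (fun k => k % 2 == 1)

-- basic getD/set facts
theorem pv_getD_set_ne (xs : List Int) (i j : Nat) (v d : Int) (h : i ≠ j) :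
    (xs.set i v).getD j d = xs.getD j d := by
  simp [List.getD_eq_getElem?_getD, List.getElem?_set_ne h]

theorem pv_getD_set_self (xs : List Int) (i : Nat) (v d : Int) (h : i < xs.length) :
    (xs.set i v).getD i d = v := by
  simp [List.getD_eq_getElem?_getD, h]

theorem pv_apply_length (s w : List Int) (k : Nat) : (pvApply s w k).length = w.length := by
  unfold pvApply; split_ifs <;> simp

theorem pv_apply_getD_ne (s w : List Int) (k j : Nat) (h1 : j ≠ k) (h2 : j ≠ k + 2) :
    (pvApply s w k).getD j 0 = w.getD j 0 := by
  unfold pvApply; split_ifs with h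
  · rw [pv_getD_set_ne _ _ _ _ _ (by omega), pv_getD_set_ne _ _ _ _ _ (by omega)]
  · rfl

theorem pv_apply_getD_k (s w : List Int) (k : Nat) (hc : pvCond s w k = true)
    (hk : k + 2 < w.length) :
    (pvApply s w k).getD k 0 = w.getD (k+2) 0 := by
  unfold pvApply; rw [if_pos hc, pv_getD_set_ne _ _ _ _ _ (by omega),
    pv_getD_set_self _ _ _ _ (by omega)]

theorem pv_apply_getD_k2 (s w : List Int) (k : Nat) (hc : pvCond s w k = true)
    (hk : k + 2 < w.length) :
    (pvApply s w k).getD (k+2) 0 = w.getD k 0 := by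
  unfold pvApply; rw [if_pos hc, pv_getD_set_self _ _ _ _ (by simpa using hk)]

-- counting
theorem pv_cnt_le (s : List Int) (N : Nat) (w : List Int) : pvCnt s N w ≤ N := by
  calc pvCnt s N w ≤ (List.range N).length := List.countP_le_length
  _ = N := List.length_range

theorem pv_cnt_apply_lt (s : List Int) (N : Nat) (w : List Int) (k : Nat)
    (hc : pvCond s w k = true) (hN : k + 2 < N) (hL : k + 2 < w.length) :
    pvCnt s N w < pvCnt s N (pvApply s w k) := by
  have h2 := pv_count2
    (fun j => (pvApply s w k).getD j 0 == s.getD j 0)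
    (fun j => w.getD j 0 == s.getD j 0)
    N k (k+2) (by omega) (by omega) (by omega)
    (by intro j hj1 hj2; simp only; rw [pv_apply_getD_ne s w k j hj1 hj2])
  simp only at h2
  unfold pvCnt
  simp only [pv_apply_getD_k s w k hc hL, pv_apply_getD_k2 s w k hc hL] at h2
  unfold pvCond at hc
  simp only [decide_eq_true_eq] at hc
  split_ifs at h2 hc <;> omega

theorem pv_cnt_apply_le (s : List Int) (N : Nat) (w : List Int) (k : Nat)
    (hN : k + 2 < N) (hL : k + 2 < w.length) :
    pvCnt s N w ≤ pvCnt s N (pvApply s w k) := by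
  by_cases hc : pvCond s w k = true
  · exact le_of_lt (pv_cnt_apply_lt s N w k hc hN hL)
  · unfold pvApply; rw [if_neg hc]

-- pass-level facts
theorem pv_pb_length (s : List Int) (ks : List Nat) (w : List Int) :
    (pvPB s ks w).1.length = w.length := by
  induction ks generalizing w with
  | nil => rfl
  | cons k ks ih => simp only [pvPB]; rw [ih, pv_apply_length]

theorem pv_pb_flag_false (s : List Int) (ks : List Nat) (w : List Int)
    (h : (pvPB s ks w).2 = false) : (pvPB s ks w).1 = w := by
  induction ks generalizing w with
  | nil => rfl
  | cons k ks ih =>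
    simp only [pvPB, Bool.or_eq_false_iff] at h ⊢
    have hc := h.1
    have hw : pvApply s w k = w := by unfold pvApply; rw [if_neg (by simp [hc])]
    rw [hw] at h ⊢
    exact ih w h.2

theorem pv_pb_cnt_le (s : List Int) (N : Nat) :
    ∀ (ks : List Nat), (∀ k ∈ ks, k + 2 < N) →
    ∀ (w : List Int), N ≤ w.length →
    pvCnt s N w ≤ pvCnt s N (pvPB s ks w).1 := by
  intro ks
  induction ks with
  | nil => intro _ w _; exact le_rfl
  | cons k ks ih =>
    intro hN w hL
    simp only [pvPB]
    have hk := hN k (by simp)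
    calc pvCnt s N w ≤ pvCnt s N (pvApply s w k) :=
          pv_cnt_apply_le s N w k hk (by omega)
    _ ≤ _ := ih (fun m hm => hN m (by simp [hm])) (pvApply s w k)
          (by rw [pv_apply_length]; exact hL)

theorem pv_pb_cnt_flag (s : List Int) (N : Nat) :
    ∀ (ks : List Nat), (∀ k ∈ ks, k + 2 < N) →
    ∀ (w : List Int), N ≤ w.length → (pvPB s ks w).2 = true →
    pvCnt s N w < pvCnt s N (pvPB s ks w).1 := by
  intro ks
  induction ks with
  | nil => intro _ w _ h; simp [pvPB] at h
  | cons k ks ih =>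
    intro hN w hL h
    simp only [pvPB] at h ⊢
    have hk := hN k (by simp)
    have hL' : N ≤ (pvApply s w k).length := by rw [pv_apply_length]; exact hL
    by_cases hc : pvCond s w k = true
    · calc pvCnt s N w < pvCnt s N (pvApply s w k) :=
            pv_cnt_apply_lt s N w k hc hk (by omega)
      _ ≤ _ := pv_pb_cnt_le s N ks (fun m hm => hN m (by simp [hm])) _ hL'
    · have hw : pvApply s w k = w := by unfold pvApply; rw [if_neg hc]
      rw [hw] at h ⊢
      simp only [Bool.or_eq_true] at h
      rcases h with h | h
      · exact absurd h hc
      · exact ih (fun m hm => hN m (by simp [hm])) w hL h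

-- commutation between windows of different parity
theorem pv_cond_apply_disj (s w : List Int) (k m : Nat) (hd : k % 2 ≠ m % 2) :
    pvCond s (pvApply s w k) m = pvCond s w m := by
  unfold pvCond
  rw [pv_apply_getD_ne s w k m (by omega) (by omega),
      pv_apply_getD_ne s w k (m+2) (by omega) (by omega)]

theorem pv_apply_comm (s w : List Int) (k m : Nat) (hd : k % 2 ≠ m % 2) :
    pvApply s (pvApply s w k) m = pvApply s (pvApply s w m) k := by
  rw [show pvApply s (pvApply s w k) m
        = if pvCond s w m then
            (((pvApply s w k).set m ((pvApply s w k).getD (m+2) 0)).set (m+2)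
              ((pvApply s w k).getD m 0))
          else pvApply s w k from by
      rw [pvApply, pv_cond_apply_disj s w k m hd]]
  rw [show pvApply s (pvApply s w m) k
        = if pvCond s w k then
            (((pvApply s w m).set k ((pvApply s w m).getD (k+2) 0)).set (k+2)
              ((pvApply s w m).getD k 0))
          else pvApply s w m from by
      rw [pvApply, pv_cond_apply_disj s w m k (by omega)]]
  rw [pv_apply_getD_ne s w k m (by omega) (by omega),
      pv_apply_getD_ne s w k (m+2) (by omega) (by omega),
      pv_apply_getD_ne s w m k (by omega) (by omega),
      pv_apply_getD_ne s w m (k+2) (by omega) (by omega)]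
  by_cases hk : pvCond s w k = true <;> by_cases hm : pvCond s w m = true <;>
      simp only [pvApply, hk, hm, if_true, Bool.false_eq_true, if_false]
  rw [List.set_comm _ _ (show k+2 ≠ m by omega), List.set_comm _ _ (show k ≠ m by omega),
      List.set_comm _ _ (show k+2 ≠ m+2 by omega), List.set_comm _ _ (show k ≠ m+2 by omega)]

theorem pv_cond_pb_disj (s w : List Int) (ms : List Nat) (k : Nat)
    (hd : ∀ m ∈ ms, k % 2 ≠ m % 2) :
    pvCond s (pvPB s ms w).1 k = pvCond s w k := by
  induction ms generalizing w with
  | nil => rfl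
  | cons m ms ih =>
    simp only [pvPB]
    rw [ih (pvApply s w m) (fun x hx => hd x (by simp [hx])),
        pv_cond_apply_disj s w m k (by have := hd m (by simp); omega)]

theorem pv_pb_apply_comm (s w : List Int) (ms : List Nat) (k : Nat)
    (hd : ∀ m ∈ ms, k % 2 ≠ m % 2) :
    pvPB s ms (pvApply s w k) = (pvApply s (pvPB s ms w).1 k, (pvPB s ms w).2) := by
  induction ms generalizing w with
  | nil => rfl
  | cons m ms ih =>
    have hdm : k % 2 ≠ m % 2 := hd m (by simp)
    simp only [pvPB]
    rw [pv_cond_apply_disj s w k m (by omega), pv_apply_comm s w k m (by omega),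
        ih (pvApply s w m) (fun x hx => hd x (by simp [hx]))]

theorem pv_pb_pb_comm (s w : List Int) (ks1 ks2 : List Nat)
    (hd : ∀ k ∈ ks1, ∀ m ∈ ks2, k % 2 ≠ m % 2) :
    pvPB s ks2 (pvPB s ks1 w).1
      = ((pvPB s ks1 (pvPB s ks2 w).1).1, (pvPB s ks2 w).2) := by
  induction ks1 generalizing w with
  | nil => rfl
  | cons k ks1 ih =>
    simp only [pvPB]
    rw [ih (pvApply s w k) (fun x hx => hd x (by simp [hx])),
        pv_pb_apply_comm s w ks2 k (fun m hm => hd k (by simp) m hm)]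

-- the combined scan splits into an even scan then an odd scan
theorem pv_pb_append (s : List Int) (l1 l2 : List Nat) (w : List Int) :
    pvPB s (l1 ++ l2) w
      = ((pvPB s l2 (pvPB s l1 w).1).1,
         (pvPB s l1 w).2 || (pvPB s l2 (pvPB s l1 w).1).2) := by
  induction l1 generalizing w with
  | nil => simp [pvPB]
  | cons k l1 ih =>
    simp only [List.cons_append, pvPB]
    rw [ih (pvApply s w k)]
    simp [Bool.or_assoc]

theorem pv_filter_even_range (m : Nat) :
    (List.range m).filter (fun k => k % 2 == 0)
      = (List.range ((m+1)/2)).map (fun j => 2*j) := by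
  induction m with
  | zero => rfl
  | succ m ih =>
    rw [List.range_succ, List.filter_append, ih]
    by_cases hm : m % 2 = 0
    · have h1 : (m+1+1)/2 = (m+1)/2 + 1 := by omega
      rw [h1, List.range_succ, List.map_append]
      simp only [List.filter_cons, List.filter_nil, hm]
      have h2 : 2 * ((m+1)/2) = m := by omega
      simp [h2]
    · have h1 : (m+1+1)/2 = (m+1)/2 := by omega
      have h2 : (m % 2 == 0) = false := by simp [hm]
      simp [h1, h2]

theorem pv_filter_odd_range (m : Nat) :
    (List.range m).filter (fun k => k % 2 == 1)
      = (List.range (m/2)).map (fun j => 2*j+1) := by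
  induction m with
  | zero => rfl
  | succ m ih =>
    rw [List.range_succ, List.filter_append, ih]
    by_cases hm : m % 2 = 1
    · have h1 : (m+1)/2 = m/2 + 1 := by omega
      rw [h1, List.range_succ, List.map_append]
      simp only [List.filter_cons, List.filter_nil, hm]
      have h2 : 2 * (m/2) + 1 = m := by omega
      simp [h2]
    · have h1 : (m+1)/2 = m/2 := by omega
      have h2 : (m % 2 == 1) = false := by simp [hm]
      simp [h1, h2]

theorem pv_mem_filter_even (m k : Nat) (h : k ∈ (List.range m).filter (fun k => k % 2 == 0)) :
    k % 2 = 0 ∧ k < m := by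
  simp only [List.mem_filter, List.mem_range, beq_iff_eq] at h
  exact ⟨h.2, h.1⟩

theorem pv_mem_filter_odd (m k : Nat) (h : k ∈ (List.range m).filter (fun k => k % 2 == 1)) :
    k % 2 = 1 ∧ k < m := by
  simp only [List.mem_filter, List.mem_range, beq_iff_eq] at h
  exact ⟨h.2, h.1⟩

theorem pv_pb_singleton (s : List Int) (k : Nat) (w : List Int) :
    pvPB s [k] w = (pvApply s w k, pvCond s w k) := by
  simp [pvPB]

theorem pv_bool_or_rot (a b c : Bool) : ((a || b) || c) = ((a || c) || b) := by
  cases a <;> cases b <;> cases c <;> rfl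

theorem pv_pb_range_split (s : List Int) (m : Nat) (w : List Int) :
    pvPB s (List.range m) w
      = ((pvPB s ((List.range m).filter (fun k => k % 2 == 1))
            (pvPB s ((List.range m).filter (fun k => k % 2 == 0)) w).1).1,
         (pvPB s ((List.range m).filter (fun k => k % 2 == 0)) w).2
           || (pvPB s ((List.range m).filter (fun k => k % 2 == 1))
                (pvPB s ((List.range m).filter (fun k => k % 2 == 0)) w).1).2) := by
  induction m generalizing w with
  | zero => simp [pvPB]
  | succ m ih =>
    rw [List.range_succ, pv_pb_append, ih w, List.filter_append, List.filter_append]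
    by_cases hm : m % 2 = 0
    · have hf0 : [m].filter (fun k => k % 2 == 0) = [m] := by simp [hm]
      have hf1 : [m].filter (fun k => k % 2 == 1) = [] := by simp [hm]
      rw [hf0, hf1, List.append_nil, pv_pb_singleton, pv_pb_append, pv_pb_singleton]
      simp only
      set E := (List.range m).filter (fun k => k % 2 == 0) with hE
      set O := (List.range m).filter (fun k => k % 2 == 1) with hO
      set wE := (pvPB s E w).1 with hwE
      have hOodd : ∀ x ∈ O, m % 2 ≠ x % 2 := by
        intro x hx
        have := (pv_mem_filter_odd m x (hO ▸ hx)).1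
        omega
      rw [pv_pb_apply_comm s wE O m hOodd, pv_cond_pb_disj s wE O m hOodd]
      simp only [Prod.mk.injEq, true_and]
      exact pv_bool_or_rot ((pvPB s E w).2) ((pvPB s O wE).2) (pvCond s wE m)
    · have hm1 : m % 2 = 1 := by omega
      have hf0 : [m].filter (fun k => k % 2 == 0) = [] := by simp [hm]
      have hf1 : [m].filter (fun k => k % 2 == 1) = [m] := by simp [hm1]
      rw [hf0, hf1, List.append_nil, pv_pb_singleton, pv_pb_append, pv_pb_singleton]
      simp only [Prod.mk.injEq, true_and]
      rw [Bool.or_assoc]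

-- loop-level facts
theorem pv_loop_stable (s : List Int) (ks : List Nat) (f : Nat) (w : List Int)
    (h : (pvPB s ks w).2 = false) : pvLoopN s ks f w = w := by
  cases f with
  | zero => rfl
  | succ f =>
    simp only [pvLoopN, h, Bool.false_eq_true, if_false]
    exact pv_pb_flag_false s ks w h

theorem pv_loop_fuel_irrel (s : List Int) (N : Nat) (ks : List Nat)
    (hN : ∀ k ∈ ks, k + 2 < N) :
    ∀ (f f' : Nat) (w : List Int), N ≤ w.length →
    N + 1 ≤ pvCnt s N w + f → N + 1 ≤ pvCnt s N w + f' →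
    pvLoopN s ks f w = pvLoopN s ks f' w := by
  intro f
  induction f with
  | zero =>
    intro f' w hL h1 _
    have := pv_cnt_le s N w; omega
  | succ f ih =>
    intro f' w hL h1 h2
    cases f' with
    | zero => have := pv_cnt_le s N w; omega
    | succ f' =>
      simp only [pvLoopN]
      by_cases hch : (pvPB s ks w).2 = true
      · rw [if_pos hch, if_pos hch]
        have hlt := pv_pb_cnt_flag s N ks hN w hL hch
        exact ih f' (pvPB s ks w).1 (by rw [pv_pb_length]; exact hL) (by omega) (by omega)
      · simp only [Bool.not_eq_true] at hch
        rw [hch]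
        simp

theorem pv_loop_absorb (s : List Int) (N : Nat) (ks : List Nat)
    (hN : ∀ k ∈ ks, k + 2 < N) (w : List Int) (hL : N ≤ w.length) :
    pvLoopN s ks (N+1) (pvPB s ks w).1 = pvLoopN s ks (N+1) w := by
  by_cases hch : (pvPB s ks w).2 = true
  · have hstep : pvLoopN s ks (N+1) w = pvLoopN s ks N (pvPB s ks w).1 := by
      simp only [pvLoopN, hch, if_true]
    rw [hstep]
    have hlt := pv_pb_cnt_flag s N ks hN w hL hch
    exact pv_loop_fuel_irrel s N ks hN (N+1) N (pvPB s ks w).1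
      (by rw [pv_pb_length]; exact hL) (by omega) (by omega)
  · simp only [Bool.not_eq_true] at hch
    rw [pv_pb_flag_false s ks w hch]

theorem pv_loop_pb_comm (s : List Int) (ks1 ks2 : List Nat)
    (hd : ∀ k ∈ ks1, ∀ m ∈ ks2, k % 2 ≠ m % 2) :
    ∀ (f : Nat) (w : List Int),
    pvLoopN s ks1 f (pvPB s ks2 w).1 = (pvPB s ks2 (pvLoopN s ks1 f w)).1 := by
  have hd2 : ∀ k ∈ ks2, ∀ m ∈ ks1, k % 2 ≠ m % 2 := fun k hk m hm => (hd m hm k hk).symm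
  intro f
  induction f with
  | zero => intro w; rfl
  | succ f ih =>
    intro w
    have hcomm2 := pv_pb_pb_comm s w ks2 ks1 hd2
    simp only [pvLoopN, hcomm2]
    by_cases hch : (pvPB s ks1 w).2 = true
    · rw [if_pos hch, if_pos hch]
      exact ih (pvPB s ks1 w).1
    · simp only [Bool.not_eq_true] at hch
      rw [hch]
      simp only [Bool.false_eq_true, if_false]

-- ---------------------------------------------------------------
-- Part 3: bridges between the Int-world ports and the Nat model
-- ---------------------------------------------------------------

theorem pv_pass_map (s : List Int) :
    ∀ (ks : List Nat) (w : List Int) (ch : Bool),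
    pvB_pass s (ks.map (fun (k : Nat) => (k : Int))) w ch = ((pvPB s ks w).1, ch || (pvPB s ks w).2) := by
  intro ks
  induction ks with
  | nil => intro w ch; simp [pvB_pass, pvPB]
  | cons k ks ih =>
    intro w ch
    have hc2 : ((k : Int) + 2) = (((k + 2 : Nat)) : Int) := by push_cast; ring
    simp only [List.map_cons, pvB_pass, pvPB, hc2, PySem.List.pyGetD_natCast,
      PySem.List.pySetD_natCast]
    by_cases hcond : pvCond s w k = true
    · have hprop : ((if w.getD (k+2) 0 == s.getD k 0 then (1:Int) else 0)
          + (if w.getD k 0 == s.getD (k+2) 0 then 1 else 0)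
          - (if w.getD k 0 == s.getD k 0 then 1 else 0)
          - (if w.getD (k+2) 0 == s.getD (k+2) 0 then 1 else 0) > 0) := by
        unfold pvCond at hcond; simpa using hcond
      rw [if_pos hprop]
      have happ : pvApply s w k = (w.set k (w.getD (k+2) 0)).set (k+2) (w.getD k 0) := by
        unfold pvApply; rw [if_pos hcond]
      rw [← happ, ih (pvApply s w k) true, hcond]
      simp
    · have hprop : ¬ ((if w.getD (k+2) 0 == s.getD k 0 then (1:Int) else 0)
          + (if w.getD k 0 == s.getD (k+2) 0 then 1 else 0)
          - (if w.getD k 0 == s.getD k 0 then 1 else 0)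
          - (if w.getD (k+2) 0 == s.getD (k+2) 0 then 1 else 0) > 0) := by
        unfold pvCond at hcond; simpa using hcond
      rw [if_neg hprop]
      have happ : pvApply s w k = w := by unfold pvApply; rw [if_neg hcond]
      rw [ih w ch, happ]
      simp only [Bool.not_eq_true] at hcond
      rw [hcond]
      simp

theorem pv_run_map (s : List Int) (ks : List Nat) :
    ∀ (f : Nat) (w : List Int),
    pvB_run s (ks.map (fun (k : Nat) => (k : Int))) f w = pvLoopN s ks f w := by
  intro f
  induction f with
  | zero => intro w; rfl
  | succ f ih =>
    intro w
    simp only [pvB_run, pvLoopN, pv_pass_map s ks w false, Bool.false_or]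
    by_cases hch : (pvPB s ks w).2 = true
    · rw [if_pos hch, if_pos hch, ih]
    · simp only [Bool.not_eq_true] at hch
      rw [hch]
      simp

theorem pv_range1_cast (n : Int) (h3 : 3 ≤ n) :
    PySem.List.pyRange 0 (n - 2) 1 = (List.range (n.toNat - 2)).map (fun (k : Nat) => (k : Int)) := by
  rw [PySem.List.pyRange_one]
  have h0 : (n - 2 - 0).toNat = n.toNat - 2 := by omega
  rw [h0]
  exact List.map_congr_left (fun k _ => by omega)

theorem pv_range2_even_cast (n : Int) (h3 : 3 ≤ n) :
    PySem.List.pyRange 0 (n - 2) 2 = (pvKsE n.toNat).map (fun (k : Nat) => (k : Int)) := by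
  rw [PySem.List.pyRange_of_pos 0 (n-2) (by omega), pvKsE, pv_filter_even_range]
  have hif : (if (0:Int) < n - 2 then ((n - 2 - 0 + 2 - 1) / 2).toNat else 0)
      = (n.toNat - 2 + 1) / 2 := by
    rw [if_pos (by omega)]
    omega
  rw [hif, List.map_map]
  exact List.map_congr_left (fun k _ => by simp only [Function.comp]; omega)

theorem pv_range2_odd_cast (n : Int) (h3 : 3 ≤ n) :
    PySem.List.pyRange 1 (n - 2) 2 = (pvKsO n.toNat).map (fun (k : Nat) => (k : Int)) := by
  rw [PySem.List.pyRange_of_pos 1 (n-2) (by omega), pvKsO, pv_filter_odd_range]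
  have hif : (if (1:Int) < n - 2 then ((n - 2 - 1 + 2 - 1) / 2).toNat else 0)
      = (n.toNat - 2) / 2 := by
    split_ifs <;> omega
  rw [hif, List.map_map]
  exact List.map_congr_left (fun k _ => by simp only [Function.comp]; omega)

theorem pv_ksE_bound (N k : Nat) (h : k ∈ pvKsE N) : k % 2 = 0 ∧ k + 2 < N := by
  have := pv_mem_filter_even (N-2) k h
  omega

theorem pv_ksO_bound (N k : Nat) (h : k ∈ pvKsO N) : k % 2 = 1 ∧ k + 2 < N := by
  have := pv_mem_filter_odd (N-2) k h
  omega

-- the interleaved combined loop computes the staged parity fixpoints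
theorem pv_main_loop (s : List Int) (n : Int) (h3 : 3 ≤ n) :
    ∀ (f : Nat) (w : List Int), n.toNat ≤ w.length →
    n.toNat + 1 ≤ pvCnt s n.toNat w + f →
    pvC_loop s n f w
      = ((pvLoopN s (pvKsO n.toNat) (n.toNat+1)
            (pvLoopN s (pvKsE n.toNat) (n.toNat+1) w)) == s) := by
  set N := n.toNat with hN
  have hNE : ∀ k ∈ pvKsE N, k + 2 < N := fun k hk => (pv_ksE_bound N k hk).2
  have hNO : ∀ k ∈ pvKsO N, k + 2 < N := fun k hk => (pv_ksO_bound N k hk).2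
  have hdEO : ∀ k ∈ pvKsE N, ∀ m ∈ pvKsO N, k % 2 ≠ m % 2 := by
    intro k hk m hm
    have := (pv_ksE_bound N k hk).1
    have := (pv_ksO_bound N m hm).1
    omega
  have hdOE : ∀ k ∈ pvKsO N, ∀ m ∈ pvKsE N, k % 2 ≠ m % 2 := by
    intro k hk m hm
    have := (pv_ksO_bound N k hk).1
    have := (pv_ksE_bound N m hm).1
    omega
  intro f
  induction f with
  | zero =>
    intro w hL hcnt
    have := pv_cnt_le s N w; omega
  | succ f ih =>
    intro w hL hcnt
    have hsplit : pvB_pass s (PySem.List.pyRange 0 (n - 2) 1) w false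
        = ((pvPB s (List.range (N-2)) w).1, (pvPB s (List.range (N-2)) w).2) := by
      rw [pv_range1_cast n h3, pv_pass_map s (List.range (N-2)) w false]
      simp
    rw [show pvC_loop s n (f+1) w
        = (match pvB_pass s (PySem.List.pyRange 0 (n - 2) 1) w false with
           | (w', ch) => if ch then pvC_loop s n f w' else w' == s) from rfl,
      hsplit]
    have hrs := pv_pb_range_split s (N-2) w
    have hEfold : (List.range (N-2)).filter (fun k => k % 2 == 0) = pvKsE N := rfl
    have hOfold : (List.range (N-2)).filter (fun k => k % 2 == 1) = pvKsO N := rfl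
    rw [hEfold, hOfold] at hrs
    rw [hrs]
    simp only
    set wE := (pvPB s (pvKsE N) w).1 with hwE
    set cE := (pvPB s (pvKsE N) w).2 with hcE
    set SC := (pvPB s (pvKsO N) wE).1 with hSC
    set cO := (pvPB s (pvKsO N) wE).2 with hcO
    by_cases hflag : (cE || cO) = true
    · rw [if_pos hflag]
      have hLE : N ≤ wE.length := by rw [hwE, pv_pb_length]; exact hL
      have hLSC : N ≤ SC.length := by rw [hSC, pv_pb_length]; exact hLE
      have hcntE : pvCnt s N w ≤ pvCnt s N wE := by
        have h := pv_pb_cnt_le s N (pvKsE N) hNE w hL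
        rw [← hwE] at h; exact h
      have hcntO : pvCnt s N wE ≤ pvCnt s N SC := by
        have h := pv_pb_cnt_le s N (pvKsO N) hNO wE hLE
        rw [← hSC] at h; exact h
      have hstrict : pvCnt s N w + 1 ≤ pvCnt s N SC := by
        rcases Bool.or_eq_true_iff.1 hflag with h | h
        · have hh := pv_pb_cnt_flag s N (pvKsE N) hNE w hL (by rw [hcE] at h; exact h)
          rw [← hwE] at hh
          omega
        · have hh := pv_pb_cnt_flag s N (pvKsO N) hNO wE hLE (by rw [hcO] at h; exact h)
          rw [← hSC] at hh
          omega
      rw [ih SC hLSC (by omega)]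
      -- Ofix (Efix SC) = Ofix (Efix w)
      have h1 : pvLoopN s (pvKsE N) (N+1) SC
          = (pvPB s (pvKsO N) (pvLoopN s (pvKsE N) (N+1) wE)).1 := by
        rw [hSC]
        exact pv_loop_pb_comm s (pvKsE N) (pvKsO N) hdEO (N+1) wE
      have h2 : pvLoopN s (pvKsE N) (N+1) wE = pvLoopN s (pvKsE N) (N+1) w := by
        rw [hwE]
        exact pv_loop_absorb s N (pvKsE N) hNE w hL
      have hLfix : N ≤ (pvLoopN s (pvKsE N) (N+1) w).length := by
        have : ∀ (g : Nat) (x : List Int), (pvLoopN s (pvKsE N) g x).length = x.length := by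
          intro g
          induction g with
          | zero => intro x; rfl
          | succ g ihg =>
            intro x
            simp only [pvLoopN]
            split_ifs
            · rw [ihg, pv_pb_length]
            · rw [pv_pb_length]
        rw [this]; exact hL
      rw [h1, h2]
      rw [pv_loop_absorb s N (pvKsO N) hNO (pvLoopN s (pvKsE N) (N+1) w) hLfix]
    · rw [if_neg (by simp [hflag])]
      simp only [Bool.or_eq_true, not_or, Bool.not_eq_true] at hflag
      obtain ⟨hcEf, hcOf⟩ := hflag
      have hwEeq : wE = w := by rw [hwE]; exact pv_pb_flag_false s (pvKsE N) w hcEf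
      have hSCeq : SC = w := by
        rw [hSC, hwEeq]
        exact pv_pb_flag_false s (pvKsO N) w (by rw [hcO, hwEeq] at hcOf; exact hcOf)
      have hfixE : pvLoopN s (pvKsE N) (N+1) w = w := pv_loop_stable s (pvKsE N) (N+1) w hcEf
      have hfixO : pvLoopN s (pvKsO N) (N+1) w = w :=
        pv_loop_stable s (pvKsO N) (N+1) w (by rw [hcO, hwEeq] at hcOf; exact hcOf)
      rw [hSCeq, hfixE, hfixO]

-- ===== VERDICT (by name: the statement is the Claim_ definition above) =====
theorem can_sort_with_reversals_spec : Claim_equal_can_sort_with_reversals := by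
  intro n arr _ hpre
  unfold Spec_can_sort_with_reversals
  by_cases h2 : n ≤ 2
  · simp [can_sort_with_reversals, can_sort_with_reversals_alt, h2]
  · have h3 : 3 ≤ n := by omega
    have hnL : n ≤ (arr.length : Int) := by
      rcases hpre with h | h
      · omega
      · exact h
    have hslen : (PySem.List.sorted arr (fun x => x) false).length = arr.length :=
      PySem.List.length_sorted arr (fun x => x) false
    simp only [can_sort_with_reversals, can_sort_with_reversals_alt, if_neg h2]
    rw [pv_loop_rel (PySem.List.sorted arr (fun x => x) false) n
          (by rw [hslen]; exact hnL) (n.toNat + 1) arr (by omega)]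
    rw [pv_main_loop (PySem.List.sorted arr (fun x => x) false) n h3 (n.toNat + 1) arr
          (by omega) (by omega)]
    rw [pv_range2_even_cast n h3, pv_range2_odd_cast n h3,
        pv_run_map (PySem.List.sorted arr (fun x => x) false) (pvKsE n.toNat),
        pv_run_map (PySem.List.sorted arr (fun x => x) false) (pvKsO n.toNat)]
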